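-- pv_equiv track=rewrite | github.com/alaktionov-hub/python_study | modul/first_test.py | shortener
-- ===== SOURCE A (Python) =====
-- def shortener(string):
--     """
--     Function receives a long string with many words.
--     It should return the same string, but words,
--     larger then 6 symbols should be changed, symbols
--     after the sixth one should be replaced by symbol *
--     :param string
--     :returns string
--
--      Функция получает на вход длинную строку с множеством слов.
--      Она должна вернуть ту же строку, но в словах, которые длиннее 6 символов,
--      функция должна вместо всех символов после шестого поставить одну звездочку.
--      Пример: Из слова 'verwijdering' должно получиться 'verwij*'
--
--
--         """
--     # for word in list:
--
--     input_list = string.split(" ")  # split by word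
--     out_list = []  # new list with chnaged
--     for word in input_list:  # check if more than 6
--         if len(word) > 6:  # check if world have ,ore that 6
--             out_list.append(word[0:6]+"*")  # chnage and append with *
--         else:
--             out_list.append(word)  # on other case just add word back
--     return (" ").join(out_list)  # retur new list
--
--     pass
-- ===== SOURCE B (Python) =====
-- def shortener(string):
--     out = []
--     k = 0  # chars seen since last space
--     for c in string:
--         if c == ' ':
--             out.append(c)
--             k = 0
--         else:
--             k += 1
--             if k <= 6:
--                 out.append(c)
--             elif k == 7:
--                 out.append('*')
--     return ''.join(out)
-- ===== Notes on version B (the rewrite author's own statement) =====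
-- stated objective: alternative
-- what changed: Replaces split-into-words / truncate-each / rejoin with a single character-by-character scan that keeps a since-last-space counter and emits each char (first six of a word), one asterisk (the seventh) or nothing (beyond).
import Mathlib
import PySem

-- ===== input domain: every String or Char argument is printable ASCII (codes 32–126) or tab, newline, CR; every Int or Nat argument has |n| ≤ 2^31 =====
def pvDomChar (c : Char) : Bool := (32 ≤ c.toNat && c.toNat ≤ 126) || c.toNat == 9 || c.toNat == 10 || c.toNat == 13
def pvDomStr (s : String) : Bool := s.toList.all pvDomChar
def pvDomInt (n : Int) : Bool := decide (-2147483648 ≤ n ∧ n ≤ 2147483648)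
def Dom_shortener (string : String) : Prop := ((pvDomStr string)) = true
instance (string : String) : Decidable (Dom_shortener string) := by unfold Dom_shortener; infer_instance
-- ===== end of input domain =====

-- B replaces split/truncate-each/rejoin with one character scan keeping a since-last-space counter (alternative decomposition, same cost).

-- ===== PORT A =====
-- split by " ", truncate each word longer than 6 to its first 6 chars plus '*', rejoin with " "
def shortener (string : String) : String :=
  let input_list := PySem.Chars.splitOn string.toList [' ']
  let out_list := input_list.foldl
    (fun acc word =>
      if 6 < word.length then acc ++ [PySem.List.slice word (some 0) (some 6) ++ ['*']]
      else acc ++ [word]) []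
  String.ofList (PySem.Chars.join [' '] out_list)

-- ===== PORT B =====
-- the char scan: k = chars seen since the last space
def shortenerAltGo (k : Nat) : List Char → List Char
  | [] => []
  | c :: cs =>
    if c = ' ' then c :: shortenerAltGo 0 cs
    else if k + 1 ≤ 6 then c :: shortenerAltGo (k + 1) cs
    else if k + 1 = 7 then '*' :: shortenerAltGo (k + 1) cs
    else shortenerAltGo (k + 1) cs

def shortener_alt (string : String) : String :=
  String.ofList (shortenerAltGo 0 string.toList)

-- ===== PRECONDITION & SPEC =====
def Spec_shortener (string : String) (out : String) : Prop := out = shortener_alt string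
instance (string : String) (out : String) : Decidable (Spec_shortener string out) := by unfold Spec_shortener; infer_instance

-- ===== CLAIM (what is proved, stated in full; the proofs are below) =====
def Claim_equal_shortener : Prop := ∀ (string : String), Dom_shortener string → Spec_shortener string (shortener string)

-- ===== LEMMAS AND PROOFS =====

-- structural split on the single space character
def splitSp : List Char → List (List Char)
  | [] => [[]]
  | c :: cs =>
    if c = ' ' then [] :: splitSp cs
    else
      match splitSp cs with
      | [] => [[c]]
      | w :: ws => (c :: w) :: ws

lemma splitSp_ne_nil (cs : List Char) : splitSp cs ≠ [] := by
  induction cs with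
  | nil => simp [splitSp]
  | cons c cs ih =>
    simp only [splitSp]
    split
    · simp
    · cases h : splitSp cs <;> simp

-- A's word truncation
def pvTrunc (w : List Char) : List Char :=
  if 6 < w.length then w.take 6 ++ ['*'] else w

-- B's truncation continuation for a word whose first k characters were already scanned
def pvTruncCont (k : Nat) (w : List Char) : List Char :=
  if 7 ≤ k then []
  else if k + w.length ≤ 6 then w
  else w.take (6 - k) ++ ['*']

lemma pvTruncCont_zero (w : List Char) : pvTruncCont 0 w = pvTrunc w := by
  simp only [pvTruncCont, pvTrunc]
  split_ifs <;> first | rfl | omega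

lemma pvTruncCont_nil (k : Nat) : pvTruncCont k [] = [] := by
  simp only [pvTruncCont, List.length_nil]
  split_ifs <;> first | rfl | omega

lemma pvTruncCont_cons (k : Nat) (c : Char) (w : List Char) :
    pvTruncCont k (c :: w) =
      (if k + 1 ≤ 6 then [c] else if k + 1 = 7 then ['*'] else []) ++ pvTruncCont (k + 1) w := by
  by_cases h7 : 7 ≤ k
  · simp [pvTruncCont, h7, show ¬ k + 1 ≤ 6 by omega, show ¬ k + 1 = 7 by omega,
      show 7 ≤ k + 1 by omega]
  · by_cases h6 : k + 1 ≤ 6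
    · by_cases hw : k + 1 + w.length ≤ 6
      · simp [pvTruncCont, h7, h6, hw, show k + (w.length + 1) ≤ 6 by omega,
          show ¬ 7 ≤ k + 1 by omega]
      · have ht : (c :: w).take (6 - k) = c :: w.take (5 - k) := by
          rw [show 6 - k = (5 - k) + 1 by omega]; rfl
        simp [pvTruncCont, h7, h6, show ¬ k + (w.length + 1) ≤ 6 by omega,
          show ¬ 7 ≤ k + 1 by omega, show ¬ k + 1 + w.length ≤ 6 by omega, ht,
          show 6 - (k + 1) = 5 - k by omega]
    · simp [pvTruncCont, h7, h6, show k + 1 = 7 by omega,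
        show ¬ k + (w.length + 1) ≤ 6 by omega, show 6 - k = 0 by omega,
        show 7 ≤ k + 1 by omega]

-- characterize PySem.Chars.splitOn.go for the single-space separator
lemma splitOn_go_spec (fuel : Nat) (cs cur : List Char) (acc : List (List Char))
    (h : cs.length < fuel) :
    PySem.Chars.splitOn.go [' '] fuel cs cur acc =
      acc.reverse ++
        (match splitSp cs with
         | [] => []
         | w :: ws => (cur.reverse ++ w) :: ws) := by
  induction fuel generalizing cs cur acc with
  | zero => omega
  | succ fuel ih =>
    cases cs with
    | nil => simp [PySem.Chars.splitOn.go, splitSp]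
    | cons c rest =>
      by_cases hc : c = ' '
      · subst hc
        have hpre : [' '].isPrefixOf (' ' :: rest) = true := by simp [List.isPrefixOf]
        rw [show PySem.Chars.splitOn.go [' '] (fuel + 1) (' ' :: rest) cur acc
              = PySem.Chars.splitOn.go [' '] fuel (List.drop 1 (' ' :: rest)) [] (cur.reverse :: acc) by
            simp [PySem.Chars.splitOn.go, hpre]]
        simp only [List.drop_succ_cons, List.drop_zero]
        rw [ih rest [] (cur.reverse :: acc) (by simpa using Nat.lt_of_succ_lt_succ (by simpa using h))]
        cases hs : splitSp rest with
        | nil => exact absurd hs (splitSp_ne_nil rest)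
        | cons w ws => simp [splitSp, hs]
      · have hpre : [' '].isPrefixOf (c :: rest) = false := by
          simp only [List.isPrefixOf, Bool.and_eq_false_imp]
          simp [Ne.symm hc]
        rw [show PySem.Chars.splitOn.go [' '] (fuel + 1) (c :: rest) cur acc
              = PySem.Chars.splitOn.go [' '] fuel rest (c :: cur) acc by
            simp [PySem.Chars.splitOn.go, hpre]]
        rw [ih rest (c :: cur) acc (by simpa using Nat.lt_of_succ_lt_succ (by simpa using h))]
        cases hs : splitSp rest with
        | nil => exact absurd hs (splitSp_ne_nil rest)
        | cons w ws => simp [splitSp, hc, hs]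

lemma splitOn_space (cs : List Char) :
    PySem.Chars.splitOn cs [' '] = splitSp cs := by
  rw [PySem.Chars.splitOn, splitOn_go_spec (cs.length + 1) cs [] [] (by omega)]
  cases hs : splitSp cs with
  | nil => exact absurd hs (splitSp_ne_nil cs)
  | cons w ws => simp

-- B's scan equals: truncate the current word's continuation, then each later word in full
lemma shortenerAltGo_spec (cs : List Char) (k : Nat) :
    shortenerAltGo k cs =
      (match splitSp cs with
       | [] => []
       | w :: ws => pvTruncCont k w ++ (ws.map (fun v => ' ' :: pvTrunc v)).flatten) := by
  induction cs generalizing k with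
  | nil => simp [shortenerAltGo, splitSp, pvTruncCont_nil]
  | cons c cs ih =>
    by_cases hc : c = ' '
    · subst hc
      cases hs : splitSp cs with
      | nil => exact absurd hs (splitSp_ne_nil cs)
      | cons w ws =>
        simp only [shortenerAltGo, if_pos rfl, splitSp, hs, ih 0]
        simp [pvTruncCont_nil, pvTruncCont_zero]
    · cases hs : splitSp cs with
      | nil => exact absurd hs (splitSp_ne_nil cs)
      | cons w ws =>
        rw [show splitSp (c :: cs) = (c :: w) :: ws by simp [splitSp, hc, hs]]
        simp only [shortenerAltGo, if_neg hc, ih (k + 1), hs, pvTruncCont_cons]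
        split_ifs <;> simp

lemma join_space (w : List Char) (ws : List (List Char)) :
    PySem.Chars.join [' '] (w :: ws) = w ++ (ws.map (fun v => ' ' :: v)).flatten := by
  induction ws generalizing w with
  | nil => simp [PySem.Chars.join, List.intercalate]
  | cons v ws ih =>
    have := ih v
    simp only [PySem.Chars.join, List.intercalate] at this ⊢
    simp [List.intersperse, this]

lemma slice_zero_six (w : List Char) :
    PySem.List.slice w (some 0) (some 6) = w.take 6 := by
  have := PySem.List.slice_natCast w 0 6
  simpa using this

-- ===== VERDICT (by name: the statement is the Claim_ definition above) =====
theorem shortener_spec : Claim_equal_shortener := by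
  intro string _
  show shortener string = shortener_alt string
  unfold shortener shortener_alt
  rw [splitOn_space]
  have hfold : ∀ (l : List (List Char)),
      l.foldl (fun acc word =>
        if 6 < word.length then acc ++ [PySem.List.slice word (some 0) (some 6) ++ ['*']]
        else acc ++ [word]) [] = l.map pvTrunc := by
    intro l
    have hfun : (fun (acc : List (List Char)) (word : List Char) =>
        if 6 < word.length then acc ++ [PySem.List.slice word (some 0) (some 6) ++ ['*']]
        else acc ++ [word]) = fun acc word => acc ++ [pvTrunc word] := by
      funext acc word
      simp only [pvTrunc, slice_zero_six]
      split_ifs <;> rfl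
    rw [hfun]
    simpa using PySem.List.foldl_append_singleton_eq_map pvTrunc l []
  rw [show (have input_list := splitSp string.toList;
      have out_list := List.foldl
        (fun acc word =>
          if 6 < word.length then acc ++ [PySem.List.slice word (some 0) (some 6) ++ ['*']] else acc ++ [word])
        [] input_list;
      String.ofList (PySem.Chars.join [' '] out_list)) =
      String.ofList (PySem.Chars.join [' ']
        ((splitSp string.toList).foldl
          (fun acc word =>
            if 6 < word.length then acc ++ [PySem.List.slice word (some 0) (some 6) ++ ['*']] else acc ++ [word])
          [])) from rfl]
  rw [hfold, shortenerAltGo_spec]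
  cases hs : splitSp string.toList with
  | nil => exact absurd hs (splitSp_ne_nil string.toList)
  | cons w ws =>
    simp [join_space, pvTruncCont_zero, List.map_map]
    rfl
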